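-- pv_equiv track=rewrite | github.com/alpha-black/school-stuff | algos/radom/resource_access_log.py | count_times_in_window
-- ===== SOURCE A (Python) =====
-- def count_times_in_window(times, window):
--     l, r = 0, 1
--     max_count = 0
--     count = 0
--     while r < len(times):
--         if (times[r] - times[l]) <= window:
--             r+=1
--             count += 1
--             max_count = max(max_count, count)
--             continue
--
--
--         l += 1
--         r = l+1
--         count = 0
--     return max_count
-- ===== SOURCE B (Python) =====
-- def count_times_in_window(times, window):
--     # O(n log n): scan l right-to-left keeping a monotonic stack of the strict
--     # prefix-maxima of the suffix times[l+1:] (value, index), values descending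
--     # along the list; binary-search it for the first index whose value exceeds
--     # times[l] + window.
--     n = len(times)
--     best = 0
--     st = []  # (value, index); values strictly decreasing, indices strictly decreasing
--     for l in range(n - 2, -1, -1):
--         v = times[l + 1]
--         while st and st[-1][0] <= v:
--             st.pop()
--         st.append((v, l + 1))
--         t = times[l] + window
--         lo, hi = 0, len(st)
--         while lo < hi:
--             mid = (lo + hi) // 2
--             if t < st[mid][0]:
--                 lo = mid + 1
--             else:
--                 hi = mid
--         stop = n if lo == 0 else st[lo - 1][1]
--         best = max(best, stop - l - 1)
--     return best
-- ===== Notes on version B (the rewrite author's own statement) =====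
-- stated objective: faster
-- what changed: Replaced the restart-from-scratch two-pointer scan (which rescans from l+1 after every failure) by a right-to-left pass that maintains a monotonic stack of the strict prefix-maxima of the suffix and binary-searches it for the first element exceeding times[l]+window.
import Mathlib
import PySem

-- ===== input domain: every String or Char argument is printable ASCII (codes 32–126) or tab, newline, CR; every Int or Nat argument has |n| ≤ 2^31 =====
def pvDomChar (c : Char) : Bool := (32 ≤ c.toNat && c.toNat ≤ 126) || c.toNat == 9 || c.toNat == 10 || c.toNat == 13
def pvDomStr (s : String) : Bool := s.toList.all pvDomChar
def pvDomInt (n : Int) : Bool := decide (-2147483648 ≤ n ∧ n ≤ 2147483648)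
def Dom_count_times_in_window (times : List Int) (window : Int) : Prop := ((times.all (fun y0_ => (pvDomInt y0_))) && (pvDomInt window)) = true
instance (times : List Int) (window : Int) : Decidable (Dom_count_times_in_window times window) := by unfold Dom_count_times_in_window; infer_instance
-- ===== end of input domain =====

-- B replaces A's restart-from-scratch two-pointer scan by a right-to-left monotonic-stack
-- pass with binary search (objective: faster; a timing run measured the speed-up).

-- ===== PORT A =====
-- A's while loop; l, r stay nonnegative throughout A's execution, so they are carried as Nat.
-- times[r], times[l] are always in range when read (r < len, l < r), so getD's default is never used.
-- termination measures for the two loop steps (named so each proof term is built once)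
theorem pvA_dec1 (L l r : Nat) (h : r < L) :
    Prod.Lex (· < ·) (· < ·) ((L - l, L - (r + 1)) : Nat × Nat) (L - l, L - r) :=
  Prod.Lex.right _ (by omega)

theorem pvA_dec2 (L l r : Nat) (h : r < L) :
    Prod.Lex (· < ·) (· < ·) ((L - (l + 1), L - (l + 2)) : Nat × Nat) (L - l, L - r) := by
  rcases Nat.lt_or_ge l L with h' | h'
  · exact Prod.Lex.left _ _ (by omega)
  · have e1 : L - (l + 1) = L - l := by omega
    rw [e1]; exact Prod.Lex.right _ (by omega)

def pvALoop (times : List Int) (window : Int) (l r : Nat) (count max_count : Int) : Int :=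
  if r < times.length then
    if times.getD r 0 - times.getD l 0 ≤ window then
      pvALoop times window l (r + 1) (count + 1) (max max_count (count + 1))
    else
      pvALoop times window (l + 1) (l + 2) 0 max_count
  else max_count
termination_by (times.length - l, times.length - r)
decreasing_by
  · exact pvA_dec1 times.length l r (by assumption)
  · exact pvA_dec2 times.length l r (by assumption)

def count_times_in_window (times : List Int) (window : Int) : Int :=
  pvALoop times window 0 1 0 0

-- ===== PORT B =====
-- 'while st and st[-1][0] <= v: st.pop()'  (st's Python end = this list's end)
theorem pvBPop_dec (st : List (Int × Int)) (p : Int × Int) (h : st.getLast? = some p) :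
    st.dropLast.length < st.length := by
  have hne : st ≠ [] := by intro e; subst e; simp at h
  have h1 : 0 < st.length := List.length_pos_iff.mpr hne
  rw [List.length_dropLast]
  omega

def pvBPop (st : List (Int × Int)) (v : Int) : List (Int × Int) :=
  match h : st.getLast? with
  | some p => if p.1 ≤ v then pvBPop st.dropLast v else st
  | none => st
termination_by st.length
decreasing_by exact pvBPop_dec st _ h

-- pop loop followed by 'st.append((v, i))'
def pvBPush (st : List (Int × Int)) (v : Int) (i : Int) : List (Int × Int) :=
  (pvBPop st v).concat (v, i)

theorem pvBS_dec1 (lo hi : Nat) (h : lo < hi) : hi - ((lo + hi) / 2 + 1) < hi - lo := by omega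

theorem pvBS_dec2 (lo hi : Nat) (h : lo < hi) : (lo + hi) / 2 - lo < hi - lo := by omega

-- 'while lo < hi: mid = (lo+hi)//2; ...'
def pvBSearch (st : List (Int × Int)) (t : Int) (lo hi : Nat) : Nat :=
  if lo < hi then
    let mid := (lo + hi) / 2
    if t < (st.getD mid (0, 0)).1 then pvBSearch st t (mid + 1) hi
    else pvBSearch st t lo mid
  else lo
termination_by hi - lo
decreasing_by
  · exact pvBS_dec1 lo hi (by assumption)
  · exact pvBS_dec2 lo hi (by assumption)

-- 'for l in range(n-2, -1, -1): ...' (processes l, l-1, …, 0)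
def pvBLoop (times : List Int) (window : Int) (l : Nat) (st : List (Int × Int)) (best : Int) : Int :=
  let st' := pvBPush st (times.getD (l + 1) 0) ((l : Int) + 1)
  let t := times.getD l 0 + window
  let lo := pvBSearch st' t 0 st'.length
  let stop : Int := if lo = 0 then (times.length : Int) else (st'.getD (lo - 1) (0, 0)).2
  let best' := max best (stop - (l : Int) - 1)
  match l with
  | 0 => best'
  | l' + 1 => pvBLoop times window l' st' best' 

def count_times_in_window_alt (times : List Int) (window : Int) : Int :=
  if 2 ≤ times.length then pvBLoop times window (times.length - 2) [] 0 else 0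

-- ===== PRECONDITION & SPEC =====
def Spec_count_times_in_window (times : List Int) (window : Int) (out : Int) : Prop := out = count_times_in_window_alt times window
instance (times : List Int) (window : Int) (out : Int) : Decidable (Spec_count_times_in_window times window out) := by unfold Spec_count_times_in_window; infer_instance

-- ===== CLAIM (what is proved, stated in full; the proofs are below) =====
def Claim_equal_count_times_in_window : Prop := ∀ (times : List Int) (window : Int), Dom_count_times_in_window times window → Spec_count_times_in_window times window (count_times_in_window times window)

-- ===== LEMMAS AND PROOFS =====

-- number of consecutive elements after position l within `window` of times[l]
def pvT (times : List Int) (window : Int) (l : Nat) : Nat :=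
  ((times.drop (l + 1)).takeWhile (fun x => decide (x - times.getD l 0 ≤ window))).length

-- first index ≥ i whose element exceeds t
def pvFei (times : List Int) (t : Int) (i : Nat) : Option Nat :=
  if i < times.length then
    if t < times.getD i 0 then some i else pvFei times t (i + 1)
  else none
termination_by times.length - i
decreasing_by omega

-- the stack contents after B has pushed indices length-1, …, i
def pvStk (times : List Int) (i : Nat) : List (Int × Int) :=
  if i < times.length then pvBPush (pvStk times (i + 1)) (times.getD i 0) (i : Int)
  else []
termination_by times.length - i
decreasing_by omega

-- max of pvT over l, l+1, …, length-2  (A's scanning order)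
def pvM (times : List Int) (window : Int) (l : Nat) : Int :=
  if l + 1 < times.length then max ((pvT times window l : Int)) (pvM times window (l + 1))
  else 0
termination_by times.length - l
decreasing_by omega

-- max of pvT over l, l-1, …, 0  (B's scanning order)
def pvMD (times : List Int) (window : Int) : Nat → Int
  | 0 => (pvT times window 0 : Int)
  | Nat.succ l => max ((pvT times window (l + 1) : Int)) (pvMD times window l)


-- ----- stack lemmas -----

theorem pvBPop_nil (v : Int) : pvBPop [] v = [] := by
  rw [pvBPop.eq_def]; split <;> simp_all

theorem pvBPop_concat_le (v : Int) (p : Int × Int) (l : List (Int × Int)) (hle : p.1 ≤ v) :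
    pvBPop (l ++ [p]) v = pvBPop l v := by
  rw [pvBPop.eq_def]
  split
  · rename_i p' h'
    rw [List.getLast?_concat] at h'
    cases h'
    rw [if_pos hle, List.dropLast_concat]
  · rename_i h'
    rw [List.getLast?_concat] at h'
    cases h'

theorem pvBPop_concat_gt (v : Int) (p : Int × Int) (l : List (Int × Int)) (hgt : v < p.1) :
    pvBPop (l ++ [p]) v = l ++ [p] := by
  rw [pvBPop.eq_def]
  split
  · rename_i p' h'
    rw [List.getLast?_concat] at h'
    cases h'
    rw [if_neg (by omega)]
  all_goals (rename_i h'; simp [List.getLast?_concat] at h')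

theorem pvBPop_spec (v : Int) (st : List (Int × Int)) :
    ∃ rem, st = pvBPop st v ++ rem ∧ ∀ p ∈ rem, p.1 ≤ v := by
  induction st using List.reverseRecOn with
  | nil => exact ⟨[], by simp [pvBPop_nil], by simp⟩
  | append_singleton l p ih =>
      by_cases hle : p.1 ≤ v
      · obtain ⟨rem, he, hr⟩ := ih
        refine ⟨rem ++ [p], ?_, ?_⟩
        · rw [pvBPop_concat_le v p l hle]
          conv_lhs => rw [he]
          simp
        · intro q hq
          rcases List.mem_append.mp hq with hq | hq
          · exact hr q hq
          · simp at hq; subst hq; exact hle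
      · rw [pvBPop_concat_gt v p l (by omega)]
        exact ⟨[], by simp, by simp⟩

theorem pvBPop_gt (v : Int) (st : List (Int × Int))
    (hp : st.Pairwise (fun p q => q.1 < p.1)) :
    ∀ p ∈ pvBPop st v, v < p.1 := by
  induction st using List.reverseRecOn with
  | nil => simp [pvBPop_nil]
  | append_singleton l p ih =>
      by_cases hle : p.1 ≤ v
      · rw [pvBPop_concat_le v p l hle]
        exact ih (hp.sublist (List.sublist_append_left _ _))
      · rw [pvBPop_concat_gt v p l (by omega)]
        intro q hq
        rcases List.mem_append.mp hq with hq | hq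
        · have := (List.pairwise_append.mp hp).2.2 q hq p (by simp)
          omega
        · simp at hq; subst hq; omega

theorem pvBPush_pairwise (v : Int) (i : Int) (st : List (Int × Int))
    (hp : st.Pairwise (fun p q => q.1 < p.1)) :
    (pvBPush st v i).Pairwise (fun p q => q.1 < p.1) := by
  unfold pvBPush
  rw [List.concat_eq_append, List.pairwise_append]
  obtain ⟨rem, he, _⟩ := pvBPop_spec v st
  have hpop : (pvBPop st v).Pairwise (fun p q => q.1 < p.1) := by
    rw [he] at hp; exact hp.sublist (List.sublist_append_left _ _)
  refine ⟨hpop, by simp, ?_⟩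
  intro a ha b hb
  simp at hb; subst hb
  exact pvBPop_gt v st hp a ha

theorem pvStk_pos (times : List Int) (i : Nat) (h : i < times.length) :
    pvStk times i = pvBPush (pvStk times (i + 1)) (times.getD i 0) (i : Int) := by
  rw [pvStk.eq_def]; rw [if_pos h]

theorem pvStk_neg (times : List Int) (i : Nat) (h : ¬ i < times.length) :
    pvStk times i = [] := by
  rw [pvStk.eq_def]; rw [if_neg h]

theorem pvStk_pairwise (times : List Int) (i : Nat) :
    (pvStk times i).Pairwise (fun p q => q.1 < p.1) := by
  fun_induction pvStk times i with
  | case1 i h ih => exact pvBPush_pairwise _ _ _ ih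
  | case2 i h => simp


-- ----- takeWhile position lemmas -----

theorem pv_tw_sat {a : Type} (p : a → Bool) (d : a) :
    ∀ (l : List a) (j : Nat), j < (l.takeWhile p).length → p (l.getD j d) = true := by
  intro l
  induction l with
  | nil => simp
  | cons x l ih =>
      intro j hj
      by_cases hpx : p x
      · rw [List.takeWhile_cons_of_pos hpx] at hj
        cases j with
        | zero => simpa using hpx
        | succ j =>
            rw [List.getD_cons_succ]
            exact ih j (by simpa using hj)
      · rw [List.takeWhile_cons_of_neg hpx] at hj
        simp at hj

theorem pv_tw_stop {a : Type} (p : a → Bool) (d : a) :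
    ∀ (l : List a), (l.takeWhile p).length < l.length ->
      p (l.getD ((l.takeWhile p).length) d) = false := by
  intro l
  induction l with
  | nil => simp
  | cons x l ih =>
      intro h
      by_cases hpx : p x
      · rw [List.takeWhile_cons_of_pos hpx] at h ⊢
        simp only [List.length_cons] at h ⊢
        rw [List.getD_cons_succ]
        exact ih (by omega)
      · rw [List.takeWhile_cons_of_neg hpx] at h ⊢
        simpa using hpx

theorem pv_tw_app_false {a : Type} (p : a → Bool) (l r : List a)
    (hr : ∀ x ∈ r, p x = false) : (l ++ r).takeWhile p = l.takeWhile p := by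
  induction l with
  | nil =>
      simp only [List.nil_append, List.takeWhile_nil]
      cases r with
      | nil => rfl
      | cons y r => exact List.takeWhile_cons_of_neg (by simp [hr y (by simp)])
  | cons x l ih =>
      by_cases hpx : p x
      · simp only [List.cons_append, List.takeWhile_cons_of_pos hpx, ih]
      · simp only [List.cons_append, List.takeWhile_cons_of_neg hpx]

-- ----- binary search -----

theorem pvBSearch_spec (st : List (Int × Int)) (t : Int)
    (hdec : ∀ j1 j2, j1 < j2 → j2 < st.length ->
      (st.getD j2 (0,0)).1 < (st.getD j1 (0,0)).1) :
    ∀ (d lo hi : Nat), d = hi - lo ->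
      lo ≤ (st.takeWhile (fun q => decide (t < q.1))).length ->
      (st.takeWhile (fun q => decide (t < q.1))).length ≤ hi ->
      hi ≤ st.length ->
      pvBSearch st t lo hi = (st.takeWhile (fun q => decide (t < q.1))).length := by
  intro d
  induction d using Nat.strong_induction_on with
  | _ d ih =>
    intro lo hi hd hlo hhi hlen
    rw [pvBSearch.eq_def]
    by_cases hlh : lo < hi
    · rw [if_pos hlh]
      by_cases hmid : t < (st.getD ((lo + hi) / 2) (0,0)).1
      · rw [if_pos hmid]
        have hm : (lo + hi) / 2 < (st.takeWhile (fun q => decide (t < q.1))).length := by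
          by_contra hc
          push_neg at hc
          have hKlen : (st.takeWhile (fun q => decide (t < q.1))).length < st.length := by omega
          have h1 := pv_tw_stop (fun q => decide (t < q.1)) (0,0) st hKlen
          simp only [decide_eq_false_iff_not] at h1
          rcases Nat.lt_or_ge (st.takeWhile (fun q => decide (t < q.1))).length ((lo + hi) / 2) with hc2 | hc2
          · have := hdec _ _ hc2 (by omega)
            omega
          · have : (lo + hi) / 2 = (st.takeWhile (fun q => decide (t < q.1))).length := by omega
            rw [this] at hmid
            omega
        exact ih (hi - ((lo + hi) / 2 + 1)) (by omega) _ _ rfl (by omega) hhi hlen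
      · rw [if_neg hmid]
        have hm : (st.takeWhile (fun q => decide (t < q.1))).length ≤ (lo + hi) / 2 := by
          by_contra hc
          push_neg at hc
          have := pv_tw_sat (fun q => decide (t < q.1)) (0,0) st _ hc
          simp only [decide_eq_true_eq] at this
          omega
        exact ih ((lo + hi) / 2 - lo) (by omega) _ _ rfl hlo hm (by omega)
    · rw [if_neg hlh]
      omega


-- ----- the stack answers 'first index whose element exceeds t' -----

theorem pvQ (times : List Int) (t : Int) (i : Nat) :
    match pvFei times t i with
    | none => (pvStk times i).takeWhile (fun q => decide (t < q.1)) = []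
    | some j => ((pvStk times i).takeWhile (fun q => decide (t < q.1))).getLast?
        = some (times.getD j 0, (j : Int)) := by
  fun_induction pvFei times t i with
  | case1 i h hlt =>
      simp only []
      rw [pvStk_pos times i h]
      unfold pvBPush
      rw [List.concat_eq_append]
      rw [List.takeWhile_eq_self_iff.mpr ?hall]
      case hall =>
        intro q hq
        rcases List.mem_append.mp hq with hq | hq
        · have := pvBPop_gt (times.getD i 0) _ (pvStk_pairwise times (i+1)) q hq
          have hgg : times.getD i 0 = times[i]?.getD 0 := rfl
          simp only [decide_eq_true_eq]; omega
        · simp at hq; subst hq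
          have hgg : times.getD i 0 = times[i]?.getD 0 := rfl
          simp only [decide_eq_true_eq]; omega
      rw [List.getLast?_concat]
  | case2 i h hlt ih =>
      have hkey : (pvStk times i).takeWhile (fun q => decide (t < q.1))
          = (pvStk times (i+1)).takeWhile (fun q => decide (t < q.1)) := by
        rw [pvStk_pos times i h]
        unfold pvBPush
        rw [List.concat_eq_append]
        obtain ⟨rem, he, hrem⟩ := pvBPop_spec (times.getD i 0) (pvStk times (i+1))
        rw [pv_tw_app_false _ _ _
          (by intro x hx; simp at hx; subst hx
              have hgg : times.getD i 0 = times[i]?.getD 0 := rfl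
              simp only [decide_eq_false_iff_not]; omega)]
        conv_rhs => rw [he]
        rw [pv_tw_app_false _ _ _
          (by intro x hx; have := hrem x hx; simp only [decide_eq_false_iff_not]; omega)]
      rw [hkey]
      exact ih
  | case3 i h =>
      simp only []
      rw [pvStk_neg times i h]
      simp

-- ----- pvFei as a takeWhile length -----

theorem pvFei_tw (times : List Int) (t : Int) (i : Nat) :
    pvFei times t i =
      (if i + ((times.drop i).takeWhile (fun x => decide (x ≤ t))).length < times.length
       then some (i + ((times.drop i).takeWhile (fun x => decide (x ≤ t))).length) else none) := by
  fun_induction pvFei times t i with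
  | case1 i h hlt =>
      rw [List.drop_eq_getElem_cons h]
      rw [List.takeWhile_cons_of_neg
        (by rw [List.getD_eq_getElem _ _ h] at hlt; simp only [decide_eq_true_eq]; omega)]
      simp only [List.length_nil, Nat.add_zero]
      rw [if_pos h]
  | case2 i h hlt ih =>
      rw [List.drop_eq_getElem_cons h]
      rw [List.takeWhile_cons_of_pos
        (by rw [List.getD_eq_getElem _ _ h] at hlt; simp only [decide_eq_true_eq]; omega)]
      rw [ih]
      have e1 : i + (((times.drop (i+1)).takeWhile (fun x => decide (x ≤ t))).length + 1)
          = (i+1) + ((times.drop (i+1)).takeWhile (fun x => decide (x ≤ t))).length := by omega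
      simp only [List.length_cons, e1]
  | case3 i h =>
      rw [List.drop_eq_nil_of_le (by omega)]
      simp [h]

-- pvT with the predicate rewritten as 'x ≤ times[l] + window'
theorem pvT_eq (times : List Int) (window : Int) (l : Nat) :
    pvT times window l =
      ((times.drop (l+1)).takeWhile (fun x => decide (x ≤ times.getD l 0 + window))).length := by
  unfold pvT
  have : (fun x => decide (x - times.getD l 0 ≤ window))
      = (fun x => decide (x ≤ times.getD l 0 + window)) := by
    funext x; rw [decide_eq_decide]; omega
  rw [this]

theorem pvT_le (times : List Int) (window : Int) (l : Nat) :
    pvT times window l ≤ times.length - (l + 1) := by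
  have h := (List.takeWhile_prefix (l := times.drop (l+1))
    (p := fun x => decide (x - times.getD l 0 ≤ window))).length_le
  simp only [List.length_drop] at h
  simpa [pvT] using h


-- ----- B's per-iteration value equals pvT -----

theorem pvQ_none (times : List Int) (t : Int) (i : Nat)
    (h : pvFei times t i = none) :
    (pvStk times i).takeWhile (fun q => decide (t < q.1)) = [] := by
  have hq := pvQ times t i
  rw [h] at hq
  exact hq

theorem pvQ_some (times : List Int) (t : Int) (i j : Nat)
    (h : pvFei times t i = some j) :
    ((pvStk times i).takeWhile (fun q => decide (t < q.1))).getLast?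
      = some (times.getD j 0, (j : Int)) := by
  have hq := pvQ times t i
  rw [h] at hq
  exact hq

theorem pv_stop_eq (times : List Int) (window : Int) (l : Nat) (hl : l + 1 < times.length) :
    (if pvBSearch (pvStk times (l+1)) (times.getD l 0 + window) 0 (pvStk times (l+1)).length = 0
       then (times.length : Int)
       else ((pvStk times (l+1)).getD
         (pvBSearch (pvStk times (l+1)) (times.getD l 0 + window) 0 (pvStk times (l+1)).length - 1)
         (0,0)).2)
      - (l : Int) - 1 = (pvT times window l : Int) := by
  have hp := pvStk_pairwise times (l+1)
  have hdec : ∀ j1 j2, j1 < j2 → j2 < (pvStk times (l+1)).length →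
      ((pvStk times (l+1)).getD j2 (0,0)).1 < ((pvStk times (l+1)).getD j1 (0,0)).1 := by
    intro j1 j2 h12 h2
    rw [List.pairwise_iff_getElem] at hp
    have h3 := hp j1 j2 (by omega) h2 h12
    have g1 : (pvStk times (l+1)).getD j1 (0,0) = (pvStk times (l+1))[j1] :=
      List.getD_eq_getElem _ _ (by omega)
    have g2 : (pvStk times (l+1)).getD j2 (0,0) = (pvStk times (l+1))[j2] :=
      List.getD_eq_getElem _ _ h2
    rw [g1, g2]; exact h3
  have hKle : ((pvStk times (l+1)).takeWhile
        (fun q => decide (times.getD l 0 + window < q.1))).length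
      ≤ (pvStk times (l+1)).length := (List.takeWhile_prefix _).length_le
  have hlo := pvBSearch_spec (pvStk times (l+1)) (times.getD l 0 + window) hdec
    ((pvStk times (l+1)).length - 0) 0 (pvStk times (l+1)).length rfl (by omega) hKle le_rfl
  rw [pvT_eq]
  have hkle2 : ((times.drop (l+1)).takeWhile
        (fun x => decide (x ≤ times.getD l 0 + window))).length ≤ times.length - (l+1) := by
    have h5 := (List.takeWhile_prefix (l := times.drop (l+1))
      (p := fun x => decide (x ≤ times.getD l 0 + window))).length_le
    have e : (times.drop (l+1)).length = times.length - (l+1) := by simp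
    omega
  by_cases hcase : (l+1) + ((times.drop (l+1)).takeWhile
      (fun x => decide (x ≤ times.getD l 0 + window))).length < times.length
  · have hfei : pvFei times (times.getD l 0 + window) (l+1)
        = some ((l+1) + ((times.drop (l+1)).takeWhile
            (fun x => decide (x ≤ times.getD l 0 + window))).length) := by
      rw [pvFei_tw]
      rw [if_pos hcase]
    have hq := pvQ_some times _ _ _ hfei
    have hne : (pvStk times (l+1)).takeWhile
        (fun q => decide (times.getD l 0 + window < q.1)) ≠ [] := by
      intro e; rw [e] at hq; simp at hq
    have hKpos : 0 < ((pvStk times (l+1)).takeWhile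
        (fun q => decide (times.getD l 0 + window < q.1))).length :=
      List.length_pos_iff.mpr hne
    rw [hlo, if_neg (by omega)]
    have g3 : (pvStk times (l+1)).getD
        (((pvStk times (l+1)).takeWhile
          (fun q => decide (times.getD l 0 + window < q.1))).length - 1) (0,0)
        = (pvStk times (l+1))[((pvStk times (l+1)).takeWhile
          (fun q => decide (times.getD l 0 + window < q.1))).length - 1] :=
      List.getD_eq_getElem _ _ (by omega)
    rw [g3]
    have hpre := List.takeWhile_prefix (l := pvStk times (l+1))
      (p := fun q => decide (times.getD l 0 + window < q.1))
    have hgl : ((pvStk times (l+1)).takeWhile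
          (fun q => decide (times.getD l 0 + window < q.1))).getLast?
        = some (((pvStk times (l+1)).takeWhile
            (fun q => decide (times.getD l 0 + window < q.1)))[((pvStk times (l+1)).takeWhile
            (fun q => decide (times.getD l 0 + window < q.1))).length - 1]) := by
      rw [List.getLast?_eq_getElem?, List.getElem?_eq_getElem (by omega)]
    rw [hgl, Option.some_inj] at hq
    have hsame : (pvStk times (l+1))[((pvStk times (l+1)).takeWhile
          (fun q => decide (times.getD l 0 + window < q.1))).length - 1]
        = ((pvStk times (l+1)).takeWhile
            (fun q => decide (times.getD l 0 + window < q.1)))[((pvStk times (l+1)).takeWhile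
            (fun q => decide (times.getD l 0 + window < q.1))).length - 1] :=
      (hpre.getElem (by omega)).symm
    rw [hsame, hq]
    dsimp only
    omega
  · have hfei : pvFei times (times.getD l 0 + window) (l+1) = none := by
      rw [pvFei_tw]
      rw [if_neg hcase]
    have hq := pvQ_none times _ _ hfei
    rw [hlo, if_pos (by rw [hq]; simp)]
    omega

-- ----- A's loop computes the max of pvT -----

theorem pvM_nonneg (times : List Int) (window : Int) (l : Nat) :
    0 ≤ pvM times window l := by
  fun_induction pvM times window l with
  | case1 l h ih => positivity
  | case2 l h => simp

theorem pvM_le (times : List Int) (window : Int) (l : Nat) :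
    pvM times window l ≤ max 0 ((times.length : Int) - l - 1) := by
  fun_induction pvM times window l with
  | case1 l h ih =>
      have h1 := pvT_le times window l
      have h2 : ((pvT times window l : Nat) : Int) ≤ (times.length : Int) - l - 1 := by
        push_cast; omega
      omega
  | case2 l h => simp

theorem pvMD_nonneg (times : List Int) (window : Int) (l : Nat) :
    0 ≤ pvMD times window l := by
  induction l with
  | zero => unfold pvMD; positivity
  | succ l ih => unfold pvMD; omega

theorem pvA_inner (times : List Int) (window : Int) (l : Nat) (hl : l + 1 ≤ times.length) :
    ∀ (d j : Nat) (m : Int), d = pvT times window l - j → j ≤ pvT times window l → 0 ≤ m →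
    pvALoop times window l (l + 1 + j) ((j : Int)) (max m (j : Int)) =
      (if l + 1 + pvT times window l = times.length
       then max m ((pvT times window l : Int))
       else pvALoop times window (l+1) (l+2) 0 (max m ((pvT times window l : Int)))) := by
  intro d
  induction d using Nat.strong_induction_on with
  | _ d ih =>
    intro j m hd hj hm
    have hTle := pvT_le times window l
    have hdl : (times.drop (l+1)).length = times.length - (l+1) := by simp
    by_cases hr : l + 1 + j < times.length
    · rw [pvALoop.eq_def]
      rw [if_pos hr]
      rcases Nat.lt_or_ge j (pvT times window l) with hjT | hjT
      · have hsat := pv_tw_sat (fun x => decide (x - times.getD l 0 ≤ window)) 0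
          (times.drop (l+1)) j hjT
        have hgd : (times.drop (l+1)).getD j 0 = times.getD (l+1+j) 0 := by
          rw [List.getD_eq_getElem _ _ (by omega), List.getD_eq_getElem _ _ (by omega)]
          rw [List.getElem_drop]
        rw [hgd] at hsat
        simp only [decide_eq_true_eq] at hsat
        rw [if_pos hsat]
        have e1 : l + 1 + j + 1 = l + 1 + (j + 1) := by omega
        have e2 : ((j : Int)) + 1 = ((j + 1 : Nat) : Int) := by push_cast; ring
        rw [e1, e2]
        have e3 : max (max m ((j : Int))) (((j + 1 : Nat) : Int)) = max m (((j + 1 : Nat) : Int)) := by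
          push_cast; omega
        rw [e3]
        exact ih (pvT times window l - (j+1)) (by omega) (j+1) m rfl (by omega) hm
      · have hjeq : j = pvT times window l := by omega
        subst hjeq
        have hTlt : pvT times window l < (times.drop (l+1)).length := by omega
        have hstop : (decide ((times.drop (l+1)).getD (pvT times window l) 0
            - times.getD l 0 ≤ window)) = false :=
          pv_tw_stop (fun x => decide (x - times.getD l 0 ≤ window)) 0 (times.drop (l+1)) hTlt
        have hgd : (times.drop (l+1)).getD (pvT times window l) 0
            = times.getD (l+1+pvT times window l) 0 := by
          rw [List.getD_eq_getElem _ _ (by omega), List.getD_eq_getElem _ _ (by omega)]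
          rw [List.getElem_drop]
        rw [hgd] at hstop
        simp only [decide_eq_false_iff_not] at hstop
        rw [if_neg hstop]
        rw [if_neg (by omega)]
    · rw [pvALoop.eq_def]
      rw [if_neg hr]
      have hjeq : j = pvT times window l := by omega
      have hend : l + 1 + pvT times window l = times.length := by omega
      rw [if_pos hend, hjeq]

theorem pvA_outer (times : List Int) (window : Int) :
    ∀ (d l : Nat) (m : Int), d = times.length - l → l + 1 ≤ times.length → 0 ≤ m →
    pvALoop times window l (l+1) 0 m = max m (pvM times window l) := by
  intro d
  induction d using Nat.strong_induction_on with
  | _ d ih =>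
    intro l m hd hl hm
    have h0 := pvA_inner times window l hl (pvT times window l) 0 m (by omega) (by omega) hm
    simp only [Nat.add_zero, Nat.cast_zero, max_eq_left hm] at h0
    have hTle := pvT_le times window l
    by_cases hend : l + 1 + pvT times window l = times.length
    · rw [if_pos hend] at h0
      rw [h0]
      rcases Nat.lt_or_ge (l+1) times.length with hlt | hge
      · rw [pvM.eq_def, if_pos hlt]
        have hMle := pvM_le times window (l+1)
        have hMnn := pvM_nonneg times window (l+1)
        omega
      · rw [pvM.eq_def, if_neg (by omega)]
        have hz : pvT times window l = 0 := by omega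
        rw [hz]
        simp
    · rw [if_neg hend] at h0
      have hl2 : l + 2 ≤ times.length := by
        rcases Nat.lt_or_ge (l+1) times.length with hlt | hge
        · omega
        · exfalso
          have hz : pvT times window l = 0 := by omega
          omega
      rw [h0]
      rw [ih (times.length - (l+1)) (by omega) (l+1) (max m ((pvT times window l : Int)))
        rfl (by omega) (by positivity)]
      conv_rhs => rw [pvM.eq_def]
      rw [if_pos (by omega : l + 1 < times.length)]
      omega

-- ----- B's loop computes the max of pvT -----

theorem pvBLoop_inv (times : List Int) (window : Int) :
    ∀ (l : Nat) (best : Int), l + 2 ≤ times.length →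
    pvBLoop times window l (pvStk times (l+2)) best = max best (pvMD times window l) := by
  intro l
  induction l with
  | zero =>
      intro best h2
      rw [pvBLoop.eq_def]
      simp only []
      have hpush : pvBPush (pvStk times (0+2)) (times.getD (0+1) 0) ((((0 : Nat)) : Int) + 1)
          = pvStk times (0+1) := by
        rw [pvStk_pos times 1 (by omega)]
        norm_num
      rw [hpush]
      have hstop := pv_stop_eq times window 0 (by omega)
      rw [hstop]
      show max best ((pvT times window 0 : Int)) = max best (pvMD times window 0)
      rfl
  | succ l ihl =>
      intro best h2
      rw [pvBLoop.eq_def]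
      simp only []
      have hpush : pvBPush (pvStk times (l+1+2)) (times.getD (l+1+1) 0) ((((l+1 : Nat)) : Int) + 1)
          = pvStk times (l+2) := by
        rw [pvStk_pos times (l+2) (by omega)]
        have e1 : (l : Nat) + 1 + 1 = l + 2 := rfl
        have e2 : (((l+1 : Nat) : Int)) + 1 = (((l+2 : Nat) : Int)) := by push_cast; ring
        rw [e1, e2]
      rw [hpush]
      rw [ihl _ (by omega)]
      have hstop := pv_stop_eq times window (l+1) (by omega)
      simp only [show l+1+1 = l+2 from rfl] at hstop
      rw [hstop]
      show max (max best ((pvT times window (l+1) : Int))) (pvMD times window l)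
          = max best (pvMD times window (l+1))
      rw [show pvMD times window (l+1)
          = max ((pvT times window (l+1) : Int)) (pvMD times window l) from rfl]
      omega

-- ----- the two maxima agree -----

theorem pv_bridge (times : List Int) (window : Int) :
    ∀ l, l + 1 < times.length →
    max (pvMD times window l) (pvM times window (l+1)) = pvM times window 0 := by
  intro l
  induction l with
  | zero =>
      intro h
      conv_rhs => rw [pvM.eq_def]
      rw [if_pos (by omega : (0:Nat) + 1 < times.length)]
      rfl
  | succ l ihl =>
      intro h
      rw [show pvMD times window (l+1)
          = max ((pvT times window (l+1) : Int)) (pvMD times window l) from rfl]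
      rw [← ihl (by omega)]
      conv_rhs => rw [pvM.eq_def]
      rw [if_pos (by omega : l + 1 + 1 < times.length)]
      omega

theorem pv_main (times : List Int) (window : Int) :
    count_times_in_window times window = count_times_in_window_alt times window := by
  unfold count_times_in_window count_times_in_window_alt
  by_cases h2 : 2 ≤ times.length
  · rw [if_pos h2]
    have hA := pvA_outer times window (times.length - 0) 0 0 rfl (by omega) le_rfl
    have hB := pvBLoop_inv times window (times.length - 2) 0 (by omega)
    have e : times.length - 2 + 2 = times.length := by omega
    rw [e, pvStk_neg times times.length (by omega)] at hB
    rw [show (1 : Nat) = 0 + 1 from rfl]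
    rw [hA, hB]
    have hbr := pv_bridge times window (times.length - 2) (by omega)
    have hz : pvM times window (times.length - 2 + 1) = 0 := by
      rw [pvM.eq_def, if_neg (by omega)]
    rw [hz] at hbr
    have h1 := pvM_nonneg times window 0
    have h3 := pvMD_nonneg times window (times.length - 2)
    omega
  · rw [if_neg h2]
    rw [pvALoop.eq_def]
    rw [if_neg (by omega)]

-- ===== VERDICT (by name: the statement is the Claim_ definition above) =====
theorem count_times_in_window_spec : Claim_equal_count_times_in_window := by
  intro times window _
  unfold Spec_count_times_in_window
  exact pv_main times window
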